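-- pv_equiv track=rewrite | github.com/edoomm/proyecto-senales | operaciones/convolucion.py | convolucionar_arreglos
-- ===== SOURCE A (Python) =====
-- def convolucionar_arreglos (arr1, arr2):
--     T = len(arr2)
--     nueva_longitud = len(arr1) + len(arr2) - 1
--
--     # aplicamos el algoritmo de multiplicacion de columnas
--     resultados = [[0 for i in range(nueva_longitud)] for j in range(T)]
--     for i in range(0, len(arr2)):
--         for j in range(0, len(arr1)):
--             resultados[i][i + j] = arr2[i] * arr1[j]
--     resultado = [0 for i in range(nueva_longitud)]
--     for i in range(0, T):
--         for j in range(0, nueva_longitud):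
--             resultado[j] += resultados[i][j]
--
--     return resultado
-- ===== SOURCE B (Python) =====
-- def convolucionar_arreglos(arr1, arr2):
--     resultado = [0] * (len(arr1) + len(arr2) - 1)
--     for i in range(len(arr2)):
--         for j in range(len(arr1)):
--             resultado[i + j] += arr2[i] * arr1[j]
--     return resultado
-- ===== Notes on version B (the rewrite author's own statement) =====
-- stated objective: faster
-- what changed: B accumulates each product arr2[i]*arr1[j] directly into resultado[i+j] in a single double loop, eliminating A's T-by-(len1+len2-1) intermediate matrix and its second full summation pass over every matrix cell (O(len2*(len1+len2)) work and memory down to O(len1*len2) work, O(len1+len2) memory).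
import Mathlib
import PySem

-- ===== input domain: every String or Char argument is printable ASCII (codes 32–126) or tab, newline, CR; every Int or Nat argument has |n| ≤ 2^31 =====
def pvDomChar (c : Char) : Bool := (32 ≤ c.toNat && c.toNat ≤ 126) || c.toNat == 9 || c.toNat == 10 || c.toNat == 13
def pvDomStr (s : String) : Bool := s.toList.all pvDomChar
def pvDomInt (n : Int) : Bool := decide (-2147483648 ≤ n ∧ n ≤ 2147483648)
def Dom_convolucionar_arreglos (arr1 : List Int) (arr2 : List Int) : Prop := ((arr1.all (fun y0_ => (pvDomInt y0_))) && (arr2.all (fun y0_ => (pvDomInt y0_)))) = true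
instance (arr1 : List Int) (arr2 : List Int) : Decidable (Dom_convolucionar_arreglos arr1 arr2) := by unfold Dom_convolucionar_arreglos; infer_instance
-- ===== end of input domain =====

-- B accumulates each product directly into the output (resultado[i+j] += arr2[i]*arr1[j]),
-- dropping A's T×n intermediate matrix and its second full summation pass.

-- ===== PORT A =====
-- Every index A uses is in range (i < len arr2, j < len arr1, i+j < n, j < n), so getD _ 0 / getD _ [] is exact for Python's arr[i].
def convolucionar_arreglos (arr1 : List Int) (arr2 : List Int) : List Int :=
  let T := arr2.length
  let n := arr1.length + arr2.length - 1
  let resultados : List (List Int) :=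
    (List.range T).map (fun _ => (List.range n).map (fun _ => (0 : Int)))
  let resultados :=
    (List.range arr2.length).foldl (fun m i =>
      (List.range arr1.length).foldl (fun m j =>
        m.set i ((m.getD i []).set (i + j) ((arr2.getD i 0) * (arr1.getD j 0)))) m) resultados
  let resultado : List Int := (List.range n).map (fun _ => (0 : Int))
  (List.range T).foldl (fun r i =>
    (List.range n).foldl (fun r j =>
      r.set j ((r.getD j 0) + ((resultados.getD i []).getD j 0))) r) resultado

-- ===== PORT B =====
def convolucionar_arreglos_alt (arr1 : List Int) (arr2 : List Int) : List Int :=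
  (List.range arr2.length).foldl (fun r i =>
    (List.range arr1.length).foldl (fun r j =>
      r.set (i + j) ((r.getD (i + j) 0) + (arr2.getD i 0) * (arr1.getD j 0))) r)
    (List.replicate (arr1.length + arr2.length - 1) (0 : Int))

-- ===== PRECONDITION & SPEC =====
def Spec_convolucionar_arreglos (arr1 : List Int) (arr2 : List Int) (out : List Int) : Prop := out = convolucionar_arreglos_alt arr1 arr2
instance (arr1 : List Int) (arr2 : List Int) (out : List Int) : Decidable (Spec_convolucionar_arreglos arr1 arr2 out) := by unfold Spec_convolucionar_arreglos; infer_instance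

-- ===== CLAIM (what is proved, stated in full; the proofs are below) =====
def Claim_equal_convolucionar_arreglos : Prop := ∀ (arr1 : List Int) (arr2 : List Int), Dom_convolucionar_arreglos arr1 arr2 → Spec_convolucionar_arreglos arr1 arr2 (convolucionar_arreglos arr1 arr2)

-- ===== LEMMAS AND PROOFS =====

theorem pv_getD_set {α : Type} (l : List α) (m k : Nat) (a d : α) :
    (l.set m a).getD k d = if k = m ∧ m < l.length then a else l.getD k d := by
  simp [List.getD, List.getElem?_set]
  split_ifs with h1 h2 h3 h4 h5 <;> simp_all

-- B's inner loop: scatter-add over positions i+j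
theorem pv_scatter (g : Nat → Int) (i : Nat) :
    ∀ (m : Nat) (r : List Int),
      ((List.range m).foldl (fun r j => r.set (i + j) ((r.getD (i + j) 0) + g j)) r).length = r.length ∧
      ∀ k, ((List.range m).foldl (fun r j => r.set (i + j) ((r.getD (i + j) 0) + g j)) r).getD k 0
            = r.getD k 0 + (if i ≤ k ∧ k - i < m ∧ k < r.length then g (k - i) else 0) := by
  intro m
  induction m with
  | zero => intro r; simp [List.range_zero]
  | succ m ih =>
    intro r
    obtain ⟨ihl, ihg⟩ := ih r
    rw [List.range_succ, List.foldl_append]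
    simp only [List.foldl_cons, List.foldl_nil]
    refine ⟨by rw [List.length_set]; exact ihl, ?_⟩
    intro k
    rw [pv_getD_set, ihg (i + m), ihg k, ihl]
    have hm : ¬ (i ≤ i + m ∧ i + m - i < m ∧ i + m < r.length) := by omega
    rw [if_neg hm]
    by_cases hk : k = i + m ∧ i + m < r.length
    · obtain ⟨h1, h2⟩ := hk
      subst h1
      rw [if_pos ⟨rfl, h2⟩]
      have hc : i ≤ i + m ∧ i + m - i < m + 1 ∧ i + m < r.length := by omega
      rw [if_pos hc]
      have : i + m - i = m := by omega
      rw [this]; ring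
    · rw [if_neg hk]
      have hiff : (i ≤ k ∧ k - i < m ∧ k < r.length) ↔ (i ≤ k ∧ k - i < m + 1 ∧ k < r.length) := by
        omega
      simp only [hiff]

-- A's matrix-row build loop: pure sets over positions i+j
theorem pv_setrow (g : Nat → Int) (i : Nat) :
    ∀ (m : Nat) (r : List Int),
      ((List.range m).foldl (fun r j => r.set (i + j) (g j)) r).length = r.length ∧
      ∀ k, ((List.range m).foldl (fun r j => r.set (i + j) (g j)) r).getD k 0
            = if i ≤ k ∧ k - i < m ∧ k < r.length then g (k - i) else r.getD k 0 := by
  intro m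
  induction m with
  | zero => intro r; simp [List.range_zero]
  | succ m ih =>
    intro r
    obtain ⟨ihl, ihg⟩ := ih r
    rw [List.range_succ, List.foldl_append]
    simp only [List.foldl_cons, List.foldl_nil]
    refine ⟨by rw [List.length_set]; exact ihl, ?_⟩
    intro k
    rw [pv_getD_set, ihg k, ihl]
    by_cases hk : k = i + m ∧ i + m < r.length
    · obtain ⟨h1, h2⟩ := hk
      subst h1
      rw [if_pos ⟨rfl, h2⟩]
      have hc : i ≤ i + m ∧ i + m - i < m + 1 ∧ i + m < r.length := by omega
      rw [if_pos hc]
      have : i + m - i = m := by omega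
      rw [this]
    · rw [if_neg hk]
      split_ifs with h1 h2 <;> first | rfl | (exfalso; omega)

-- A's row-summing inner loop is pv_scatter at offset 0
theorem pv_addrow (g : Nat → Int) :
    ∀ (m : Nat) (r : List Int),
      ((List.range m).foldl (fun r j => r.set j ((r.getD j 0) + g j)) r).length = r.length ∧
      ∀ k, ((List.range m).foldl (fun r j => r.set j ((r.getD j 0) + g j)) r).getD k 0
            = r.getD k 0 + (if k < m ∧ k < r.length then g k else 0) := by
  have h := pv_scatter g 0
  simp only [Nat.zero_add, Nat.zero_le, true_and, Nat.sub_zero] at h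
  exact h

theorem pv_getD_range_map {α : Type} (f : Nat → α) (T i : Nat) (d : α) :
    ((List.range T).map f).getD i d = if i < T then f i else d := by
  simp [List.getD, List.getElem?_map]
  split_ifs <;> simp_all

theorem pv_set_getD_self {α : Type} (l : List α) (i : Nat) (d : α) :
    l.set i (l.getD i d) = l := by
  by_cases h : i < l.length
  · rw [List.getD_eq_getElem l d h]; exact List.set_getElem_self h
  · exact List.set_eq_of_length_le (by omega)

-- the in-place row mutation loop factors through a single set of row i
theorem pv_mtxrow (h : Nat → Int) (i : Nat) :
    ∀ (m : Nat) (mtx : List (List Int)),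
      (List.range m).foldl (fun mtx j => mtx.set i ((mtx.getD i []).set (i + j) (h j))) mtx
        = mtx.set i ((List.range m).foldl (fun row j => row.set (i + j) (h j)) (mtx.getD i [])) := by
  intro m
  induction m with
  | zero =>
    intro mtx
    simp only [List.range_zero, List.foldl_nil]
    exact (pv_set_getD_self mtx i []).symm
  | succ m ih =>
    intro mtx
    rw [List.range_succ, List.foldl_append, List.foldl_append]
    simp only [List.foldl_cons, List.foldl_nil]
    rw [ih mtx]
    by_cases hi : i < mtx.length
    · rw [List.set_set]
      congr 1
      congr 1
      rw [pv_getD_set]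
      rw [if_pos ⟨rfl, hi⟩]
    · have hle : mtx.length ≤ i := by omega
      simp [List.set_eq_of_length_le hle]

-- the outer build loop touches each row once
theorem pv_mtx (g : Nat → List Int → List Int) :
    ∀ (T : Nat) (mtx : List (List Int)),
      ((List.range T).foldl (fun m i => m.set i (g i (m.getD i []))) mtx).length = mtx.length ∧
      ∀ i, ((List.range T).foldl (fun m i => m.set i (g i (m.getD i []))) mtx).getD i []
            = if i < T ∧ i < mtx.length then g i (mtx.getD i []) else mtx.getD i [] := by
  intro T
  induction T with
  | zero => intro mtx; simp [List.range_zero]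
  | succ T ih =>
    intro mtx
    obtain ⟨ihl, ihg⟩ := ih mtx
    rw [List.range_succ, List.foldl_append]
    simp only [List.foldl_cons, List.foldl_nil]
    refine ⟨by rw [List.length_set]; exact ihl, ?_⟩
    intro i
    rw [pv_getD_set, ihg T, ihg i, ihl]
    have hT : ¬ (T < T ∧ T < mtx.length) := by omega
    rw [if_neg hT]
    by_cases hi : i = T ∧ T < mtx.length
    · obtain ⟨h1, h2⟩ := hi
      subst h1
      rw [if_pos ⟨rfl, h2⟩, if_pos ⟨by omega, h2⟩]
    · rw [if_neg hi]
      have hiff : (i < T ∧ i < mtx.length) ↔ (i < T + 1 ∧ i < mtx.length) := by omega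
      simp only [hiff]

theorem pv_eq_of_getD (l1 l2 : List Int) (hl : l1.length = l2.length)
    (hg : ∀ k, l1.getD k 0 = l2.getD k 0) : l1 = l2 := by
  apply List.ext_getElem hl
  intro k h1 h2
  have := hg k
  rwa [List.getD_eq_getElem l1 0 h1, List.getD_eq_getElem l2 0 h2] at this

-- the two outer loops agree pointwise on every state of length n
theorem pv_outer (arr1 arr2 : List Int) (M : List (List Int))
    (hM : ∀ i k, i < arr2.length →
      (M.getD i []).getD k 0
        = if i ≤ k ∧ k - i < arr1.length ∧ k < arr1.length + arr2.length - 1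
          then (arr2.getD i 0) * (arr1.getD (k - i) 0) else 0) :
    ∀ (l : List Nat), (∀ i ∈ l, i < arr2.length) →
    ∀ (r : List Int), r.length = arr1.length + arr2.length - 1 →
      l.foldl (fun r i =>
          (List.range (arr1.length + arr2.length - 1)).foldl (fun r j =>
            r.set j ((r.getD j 0) + ((M.getD i []).getD j 0))) r) r
      = l.foldl (fun r i =>
          (List.range arr1.length).foldl (fun r j =>
            r.set (i + j) ((r.getD (i + j) 0) + (arr2.getD i 0) * (arr1.getD j 0))) r) r := by
  intro l
  induction l with
  | nil => intro _ r _; rfl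
  | cons i l ih =>
    intro hmem r hr
    simp only [List.foldl_cons]
    have hi : i < arr2.length := hmem i (List.mem_cons_self)
    have hA := pv_addrow (fun j => (M.getD i []).getD j 0) (arr1.length + arr2.length - 1) r
    have hB := pv_scatter (fun j => (arr2.getD i 0) * (arr1.getD j 0)) i arr1.length r
    have hstep :
        (List.range (arr1.length + arr2.length - 1)).foldl (fun r j =>
            r.set j ((r.getD j 0) + ((M.getD i []).getD j 0))) r
        = (List.range arr1.length).foldl (fun r j =>
            r.set (i + j) ((r.getD (i + j) 0) + (arr2.getD i 0) * (arr1.getD j 0))) r := by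
      apply pv_eq_of_getD
      · rw [hA.1, hB.1]
      · intro k
        rw [hA.2 k, hB.2 k, hM i k hi, hr]
        split_ifs <;> first | rfl | omega
    rw [hstep]
    have hlen : (List.foldl (fun r j =>
        r.set (i + j) ((r.getD (i + j) 0) + (arr2.getD i 0) * (arr1.getD j 0))) r
        (List.range arr1.length)).length = arr1.length + arr2.length - 1 := by
      rw [hB.1]; exact hr
    exact ih (fun j hj => hmem j (List.mem_cons_of_mem i hj)) _ hlen

theorem pv_main (arr1 arr2 : List Int) :
    convolucionar_arreglos arr1 arr2 = convolucionar_arreglos_alt arr1 arr2 := by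
  simp only [convolucionar_arreglos, convolucionar_arreglos_alt]
  -- name the pieces
  have hzrow : ∀ k, ((List.range (arr1.length + arr2.length - 1)).map (fun _ => (0 : Int))).getD k 0 = 0 := by
    intro k; rw [pv_getD_range_map]; split_ifs <;> rfl
  have hzlen : ((List.range (arr1.length + arr2.length - 1)).map (fun _ => (0 : Int))).length
      = arr1.length + arr2.length - 1 := by
    rw [List.length_map, List.length_range]
  -- the build loop factors row by row
  have hfac : (fun (m : List (List Int)) (i : Nat) =>
        (List.range arr1.length).foldl (fun m j =>
          m.set i ((m.getD i []).set (i + j) ((arr2.getD i 0) * (arr1.getD j 0)))) m)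
      = (fun (m : List (List Int)) (i : Nat) =>
        m.set i ((List.range arr1.length).foldl (fun row j =>
          row.set (i + j) ((arr2.getD i 0) * (arr1.getD j 0))) (m.getD i []))) := by
    funext m i
    exact pv_mtxrow (fun j => (arr2.getD i 0) * (arr1.getD j 0)) i arr1.length m
  rw [hfac]
  -- characterize the built matrix
  have hM : ∀ i k, i < arr2.length →
      (((List.range arr2.length).foldl (fun m i =>
          m.set i ((List.range arr1.length).foldl (fun row j =>
            row.set (i + j) ((arr2.getD i 0) * (arr1.getD j 0))) (m.getD i [])))
          ((List.range arr2.length).map (fun _ =>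
            (List.range (arr1.length + arr2.length - 1)).map (fun _ => (0 : Int))))).getD i []).getD k 0
        = if i ≤ k ∧ k - i < arr1.length ∧ k < arr1.length + arr2.length - 1
          then (arr2.getD i 0) * (arr1.getD (k - i) 0) else 0 := by
    intro i k hi
    have hm := (pv_mtx (fun i row => (List.range arr1.length).foldl (fun row j =>
        row.set (i + j) ((arr2.getD i 0) * (arr1.getD j 0))) row) arr2.length
        ((List.range arr2.length).map (fun _ =>
          (List.range (arr1.length + arr2.length - 1)).map (fun _ => (0 : Int))))).2 i
    rw [hm]
    have hlen : ((List.range arr2.length).map (fun _ =>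
        (List.range (arr1.length + arr2.length - 1)).map (fun _ => (0 : Int)))).length = arr2.length := by
      rw [List.length_map, List.length_range]
    rw [if_pos ⟨hi, by rw [hlen]; exact hi⟩]
    rw [pv_getD_range_map, if_pos hi]
    rw [(pv_setrow (fun j => (arr2.getD i 0) * (arr1.getD j 0)) i arr1.length _).2 k]
    rw [hzlen]
    split_ifs with h1
    · rfl
    · exact hzrow k
  -- the two outer loops agree
  rw [pv_outer arr1 arr2 _ hM (List.range arr2.length)
      (fun i hi => List.mem_range.mp hi) _ hzlen]
  congr 1
  apply pv_eq_of_getD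
  · rw [hzlen, List.length_replicate]
  · intro k
    rw [hzrow k]
    simp [List.getD, List.getElem?_replicate]
    split_ifs <;> rfl

-- ===== VERDICT (by name: the statement is the Claim_ definition above) =====
theorem convolucionar_arreglos_spec : Claim_equal_convolucionar_arreglos := by
  intro arr1 arr2 _
  unfold Spec_convolucionar_arreglos
  exact pv_main arr1 arr2
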